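-- pv_equiv track=rewrite | github.com/mintiasaikoh/manxo | manxo_optimized/core/box_types/box_types.py | _extract_comma_lists
-- ===== SOURCE A (Python) =====
-- from typing import List, Dict, Any, Optional, Union, Tuple
--
-- def _extract_comma_lists(text: str) -> List[List[str]]:
--     """カンマ区切りのリストを抽出"""
--     comma_lists = []
--
--     # セミコロンで分割
--     segments = text.split(";")
--
--     for segment in segments:
--         segment = segment.strip()
--
--         # カンマが含まれているか確認
--         if "," in segment:
--             # 引用符内のカンマを考慮した分割（単純なsplit(',')は使わない）
--             in_quote = False
--             current_part = ""
--             parts = []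
--
--             for char in segment:
--                 if char == '"':
--                     in_quote = not in_quote
--                     current_part += char
--                 elif char == ',' and not in_quote:
--                     parts.append(current_part.strip())
--                     current_part = ""
--                 else:
--                     current_part += char
--
--             # 最後の部分を追加
--             if current_part:
--                 parts.append(current_part.strip())
--
--             if parts:
--                 comma_lists.append(parts)
--
--     return comma_lists
-- ===== SOURCE B (Python) =====
-- from typing import List
--
--
-- def _quoted_parts(segment: str) -> List[str]:
--     """Replace unquoted commas by a \x00 marker (quote-split tokens alternate
--     outside/inside), then split once on the marker."""
--     marked_tokens = []
--     quoted = False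
--     for token in segment.split('"'):
--         marked_tokens.append(
--             token if quoted else "".join("\x00" if c == "," else c for c in token)
--         )
--         quoted = not quoted
--     raw = '"'.join(marked_tokens).split("\x00")
--     parts = [p.strip() for p in raw[:-1]]
--     if raw[-1]:
--         parts.append(raw[-1].strip())
--     return parts
--
--
-- def _extract_comma_lists(text: str) -> List[List[str]]:
--     segments = (s.strip() for s in text.split(";"))
--     lists = (_quoted_parts(s) for s in segments if "," in s)
--     return [parts for parts in lists if parts]
-- ===== Notes on version B (the rewrite author's own statement) =====
-- stated objective: alternative
-- what changed: B replaces A's per-character in_quote state machine and accumulator loops by a staged pipeline: it splits each segment at quote characters so outside/inside tokens alternate, rewrites unquoted commas into a \x00 marker, rejoins and splits once on the marker, strips the pieces, and assembles the result with comprehensions/filters instead of A's nested loops.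
import Mathlib
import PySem

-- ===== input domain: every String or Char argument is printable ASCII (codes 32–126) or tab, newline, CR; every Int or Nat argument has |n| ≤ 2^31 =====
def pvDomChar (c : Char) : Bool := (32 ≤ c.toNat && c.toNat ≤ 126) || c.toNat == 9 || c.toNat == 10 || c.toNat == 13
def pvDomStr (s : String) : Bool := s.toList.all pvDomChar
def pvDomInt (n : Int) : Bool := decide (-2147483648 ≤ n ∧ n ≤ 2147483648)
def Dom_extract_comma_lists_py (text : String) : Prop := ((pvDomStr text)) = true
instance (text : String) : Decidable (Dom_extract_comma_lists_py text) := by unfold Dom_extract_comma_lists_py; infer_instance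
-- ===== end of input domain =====

-- B rewrites each segment into a marked string (splitting at quote characters so outside and
-- inside tokens alternate, turning unquoted commas into a marker), then splits once on the
-- marker and assembles the result with a map/filter pipeline, instead of A's per-character
-- in_quote state machine with accumulators.


-- ===== PORT A =====
-- A's inner character loop: state (in_quote, current_part, parts)
def eclA_step (st : Bool × List Char × List (List Char)) (c : Char) : Bool × List Char × List (List Char) :=
  if c = '"' then (!st.1, st.2.1 ++ [c], st.2.2)
  else if c = ',' ∧ st.1 = false then (st.1, [], st.2.2 ++ [PySem.Chars.strip st.2.1])
  else (st.1, st.2.1 ++ [c], st.2.2)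

-- the parts A collects for one (already stripped) segment
def eclA_parts (seg : List Char) : List (List Char) :=
  let st := seg.foldl eclA_step (false, [], [])
  if st.2.1 ≠ [] then st.2.2 ++ [PySem.Chars.strip st.2.1] else st.2.2

def extract_comma_lists_py (text : String) : List (List String) :=
  ((PySem.Chars.splitOn text.toList [';']).foldl (fun acc seg0 =>
      let seg := PySem.Chars.strip seg0
      if PySem.Chars.isIn [','] seg then
        let parts := eclA_parts seg
        if parts ≠ [] then acc ++ [parts] else acc
      else acc) []).map (fun p => p.map String.ofList)

-- ===== PORT B =====
-- token if quoted else "".join('\x00' if c == ',' else c for c in token), alternating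
def eclB_mark : Bool → List (List Char) → List (List Char)
  | _, [] => []
  | q, t :: ts =>
      (if q then t else t.map (fun c => if c = ',' then '\x00' else c)) :: eclB_mark (!q) ts

-- _quoted_parts: mark unquoted commas, split once on the marker, strip the pieces
def eclB_quoted_parts (seg : List Char) : List (List Char) :=
  let raw := PySem.Chars.splitOn
      (PySem.Chars.join ['"'] (eclB_mark false (PySem.Chars.splitOn seg ['"']))) ['\x00']
  let parts := (PySem.List.slice raw none (some (-1))).map PySem.Chars.strip
  match PySem.List.pyGet? raw (-1) with   -- raw[-1]; split never returns [], so `none` is unreachable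
  | none => parts
  | some last => if last ≠ [] then parts ++ [PySem.Chars.strip last] else parts

def extract_comma_lists_py_alt (text : String) : List (List String) :=
  (((((PySem.Chars.splitOn text.toList [';']).map PySem.Chars.strip).filter
      (fun seg => PySem.Chars.isIn [','] seg)).map eclB_quoted_parts).filter
      (fun parts => parts ≠ [])).map (fun p => p.map String.ofList)

-- ===== PRECONDITION & SPEC =====
def Spec_extract_comma_lists_py (text : String) (out : List (List String)) : Prop := out = extract_comma_lists_py_alt text
instance (text : String) (out : List (List String)) : Decidable (Spec_extract_comma_lists_py text out) := by unfold Spec_extract_comma_lists_py; infer_instance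

-- ===== CLAIM (what is proved, stated in full; the proofs are below) =====
def Claim_equal_extract_comma_lists_py : Prop := ∀ (text : String), Dom_extract_comma_lists_py text → Spec_extract_comma_lists_py text (extract_comma_lists_py text)

-- ===== LEMMAS AND PROOFS =====

-- structural single-character split with an explicit prefix accumulator
def mySplit (q : Char) (pre : List Char) : List Char → List (List Char)
  | [] => [pre]
  | c :: r => if c = q then pre :: mySplit q [] r else mySplit q (pre ++ [c]) r

theorem mySplit_ne_nil (q : Char) (l : List Char) : ∀ pre, mySplit q pre l ≠ [] := by
  induction l with
  | nil => intro pre; simp [mySplit]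
  | cons c r ih =>
      intro pre
      by_cases h : c = q <;> simp [mySplit, h, ih]

theorem splitOn_go_eq (q : Char) :
    ∀ (fuel : Nat) (l cur : List Char) (acc : List (List Char)), l.length < fuel →
      PySem.Chars.splitOn.go [q] fuel l cur acc = acc.reverse ++ mySplit q cur.reverse l := by
  intro fuel
  induction fuel with
  | zero => intro l cur acc h; omega
  | succ f ih =>
      intro l cur acc h
      cases l with
      | nil => simp [PySem.Chars.splitOn.go, mySplit]
      | cons c rest =>
          by_cases hq : q = c
          · subst hq
            rw [PySem.Chars.splitOn.go]
            simp only [List.isPrefixOf, BEq.rfl, Bool.true_and, if_pos, List.length_cons,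
              List.length_nil, Nat.zero_add, List.drop_succ_cons, List.drop_zero]
            rw [ih rest [] _ (by simpa using Nat.lt_of_succ_lt_succ h)]
            simp [mySplit]
          · rw [PySem.Chars.splitOn.go]
            have : [q].isPrefixOf (c :: rest) = false := by
              simp [List.isPrefixOf, hq]
            rw [this]
            simp only [Bool.false_eq_true, if_neg, not_false_iff]
            rw [ih rest (c :: cur) acc (by simpa using Nat.lt_of_succ_lt_succ h)]
            simp [mySplit, Ne.symm hq]

theorem splitOn_eq_mySplit (q : Char) (l : List Char) :
    PySem.Chars.splitOn l [q] = mySplit q [] l := by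
  have := splitOn_go_eq q (l.length + 1) l [] [] (by omega)
  simpa [PySem.Chars.splitOn] using this

theorem mySplit_modifyHead (q : Char) (l : List Char) :
    ∀ pre, mySplit q pre l = (mySplit q [] l).modifyHead (pre ++ ·) := by
  induction l with
  | nil => intro pre; simp [mySplit]
  | cons c r ih =>
      intro pre
      by_cases h : c = q
      · simp [mySplit, h]
      · rw [show mySplit q pre (c :: r) = mySplit q (pre ++ [c]) r from by simp [mySplit, h],
            show mySplit q [] (c :: r) = mySplit q [c] r from by simp [mySplit, h],
            ih (pre ++ [c]), ih [c]]
        obtain ⟨h0, t0, ht⟩ := List.exists_cons_of_ne_nil (mySplit_ne_nil q r [])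
        simp [ht]

-- the raw (unstripped) unquoted-comma pieces of a segment, built front-first
def eclRef : Bool → List Char → List (List Char)
  | _, [] => [[]]
  | q, c :: r =>
      if c = '"' then (eclRef (!q) r).modifyHead (c :: ·)
      else if c = ',' ∧ q = false then [] :: eclRef q r
      else (eclRef q r).modifyHead (c :: ·)

theorem eclRef_ne_nil (l : List Char) : ∀ q, eclRef q l ≠ [] := by
  induction l with
  | nil => intro q; simp [eclRef]
  | cons c r ih =>
      intro q
      by_cases h : c = '"'
      · have := ih (!q); simp [eclRef, h]; cases hh : eclRef (!q) r <;> simp_all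
      · by_cases h2 : c = ',' ∧ q = false
        · simp [eclRef, h, h2]
        · have := ih q; simp [eclRef, h, h2]; cases hh : eclRef q r <;> simp_all

-- finishing step shared by the two characterisations: strip all pieces, drop an empty last
def eclPack : List (List Char) → List (List Char) → List (List Char)
  | parts, [] => parts
  | parts, [p] => if p ≠ [] then parts ++ [PySem.Chars.strip p] else parts
  | parts, p :: p2 :: rest => eclPack (parts ++ [PySem.Chars.strip p]) (p2 :: rest)

-- ===== A's side: the fold equals eclPack over eclRef =====
theorem A_fold_eq (l : List Char) :
    ∀ (q : Bool) (cur : List Char) (parts : List (List Char)),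
      (let st := l.foldl eclA_step (q, cur, parts)
       if st.2.1 ≠ [] then st.2.2 ++ [PySem.Chars.strip st.2.1] else st.2.2)
        = eclPack parts ((eclRef q l).modifyHead (cur ++ ·)) := by
  induction l with
  | nil =>
      intro q cur parts
      simp [eclRef, eclPack]
  | cons c r ih =>
      intro q cur parts
      by_cases hq : c = '"'
      · subst hq
        rw [List.foldl_cons,
            show eclA_step (q, cur, parts) '"' = (!q, cur ++ ['"'], parts) from by
              simp [eclA_step]]
        rw [ih]
        obtain ⟨h0, t0, ht⟩ := List.exists_cons_of_ne_nil (eclRef_ne_nil r (!q))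
        simp [eclRef, ht]
      · by_cases hc : c = ',' ∧ q = false
        · obtain ⟨rfl, rfl⟩ := hc
          rw [List.foldl_cons,
              show eclA_step (false, cur, parts) ','
                  = (false, [], parts ++ [PySem.Chars.strip cur]) from by
                simp [eclA_step, hq]]
          rw [ih]
          obtain ⟨h0, t0, ht⟩ := List.exists_cons_of_ne_nil (eclRef_ne_nil r false)
          simp [eclRef, hq, ht, eclPack]
        · rw [List.foldl_cons,
              show eclA_step (q, cur, parts) c = (q, cur ++ [c], parts) from by
                simp [eclA_step, hq, hc]]
          rw [ih]
          obtain ⟨h0, t0, ht⟩ := List.exists_cons_of_ne_nil (eclRef_ne_nil r q)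
          simp [eclRef, hq, hc, ht]

theorem eclA_parts_eq (seg : List Char) : eclA_parts seg = eclPack [] (eclRef false seg) := by
  have h := A_fold_eq seg false [] []
  have h2 : List.modifyHead (fun x => x) (eclRef false seg) = eclRef false seg := by
    cases hh : eclRef false seg <;> simp
  simpa [eclA_parts, h2] using h

-- ===== B's side =====
-- the marked segment, characterised per character
def eclTrans : Bool → List Char → List Char
  | _, [] => []
  | q, c :: r =>
      if c = '"' then c :: eclTrans (!q) r
      else if c = ',' ∧ q = false then '\x00' :: eclTrans q r
      else c :: eclTrans q r

theorem eclB_mark_join (l : List Char) :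
    ∀ q, PySem.Chars.join ['"'] (eclB_mark q (mySplit '"' [] l)) = eclTrans q l := by
  induction l with
  | nil => intro q; cases q <;> simp [mySplit, eclB_mark, eclTrans, PySem.Chars.join_singleton]
  | cons c r ih =>
      intro q
      by_cases hq : c = '"'
      · subst hq
        rw [show mySplit '"' [] ('"' :: r) = [] :: mySplit '"' [] r from by simp [mySplit]]
        have ihq := ih (!q)
        cases hm : eclB_mark (!q) (mySplit '"' [] r) with
        | nil =>
            obtain ⟨h0, t0, ht⟩ := List.exists_cons_of_ne_nil (mySplit_ne_nil '"' r [])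
            rw [ht] at hm; simp [eclB_mark] at hm
        | cons m0 ms =>
            rw [show eclB_mark q ([] :: mySplit '"' [] r)
                  = [] :: eclB_mark (!q) (mySplit '"' [] r) from by
                cases q <;> simp [eclB_mark],
              hm, PySem.Chars.join_cons_cons, ← hm, ihq]
            simp [eclTrans]
      · rw [show mySplit '"' [] (c :: r) = mySplit '"' [c] r from by simp [mySplit, hq],
            mySplit_modifyHead '"' r [c]]
        obtain ⟨h0, t0, ht⟩ := List.exists_cons_of_ne_nil (mySplit_ne_nil '"' r [])
        have ihq := ih q
        rw [ht] at ihq ⊢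
        cases t0 with
        | nil =>
            cases q <;>
              simp_all [eclB_mark, eclTrans, PySem.Chars.join_singleton, hq] <;>
              by_cases hc : c = ',' <;> simp [hc]
        | cons t1 ts =>
            cases hm : eclB_mark (!q) (t1 :: ts) with
            | nil => simp [eclB_mark] at hm
            | cons m0 ms =>
                cases q <;>
                  simp_all [eclB_mark, eclTrans, PySem.Chars.join_cons_cons, hq] <;>
                  by_cases hc : c = ',' <;> simp [hc]

theorem mySplit_trans (l : List Char) (hx : '\x00' ∉ l) :
    ∀ q, mySplit '\x00' [] (eclTrans q l) = eclRef q l := by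
  induction l with
  | nil => intro q; simp [eclTrans, eclRef, mySplit]
  | cons c r ih =>
      intro q
      have hc0 : c ≠ '\x00' := fun h => hx (h ▸ List.mem_cons_self ..)
      have hr : '\x00' ∉ r := fun h => hx (List.mem_cons_of_mem _ h)
      by_cases hq : c = '"'
      · subst hq
        rw [show eclTrans q ('"' :: r) = '"' :: eclTrans (!q) r from by simp [eclTrans],
            show mySplit '\x00' [] ('"' :: eclTrans (!q) r)
                = mySplit '\x00' ['"'] (eclTrans (!q) r) from by simp [mySplit],
            mySplit_modifyHead, ih hr, eclRef]
        simp
      · by_cases hcc : c = ',' ∧ q = false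
        · obtain ⟨rfl, rfl⟩ := hcc
          rw [show eclTrans false (',' :: r) = '\x00' :: eclTrans false r from by
                simp [eclTrans, hq],
              show mySplit '\x00' [] ('\x00' :: eclTrans false r)
                  = [] :: mySplit '\x00' [] (eclTrans false r) from by simp [mySplit],
              ih hr, eclRef]
          simp [hq]
        · rw [show eclTrans q (c :: r) = c :: eclTrans q r from by simp [eclTrans, hq, hcc],
              show mySplit '\x00' [] (c :: eclTrans q r)
                  = mySplit '\x00' [c] (eclTrans q r) from by simp [mySplit, hc0],
              mySplit_modifyHead, ih hr]
          simp [eclRef, hq, hcc]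

theorem eclPack_spec (ps : List (List Char)) (hne : ps ≠ []) :
    ∀ parts, eclPack parts ps
      = parts ++ ps.dropLast.map PySem.Chars.strip
          ++ (if ps.getLast hne ≠ [] then [PySem.Chars.strip (ps.getLast hne)] else []) := by
  induction ps with
  | nil => exact absurd rfl hne
  | cons p rest ih =>
      intro parts
      cases rest with
      | nil => by_cases hp : p = [] <;> simp [eclPack, hp]
      | cons p2 r2 =>
          rw [show eclPack parts (p :: p2 :: r2)
                = eclPack (parts ++ [PySem.Chars.strip p]) (p2 :: r2) from rfl,
              ih (by simp)]
          simp

theorem eclB_parts_eq (seg : List Char) (hx : '\x00' ∉ seg) :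
    eclB_quoted_parts seg = eclPack [] (eclRef false seg) := by
  unfold eclB_quoted_parts
  rw [splitOn_eq_mySplit '"' seg, eclB_mark_join seg false, splitOn_eq_mySplit,
      mySplit_trans seg hx false]
  have hne : eclRef false seg ≠ [] := eclRef_ne_nil seg false
  rw [eclPack_spec (eclRef false seg) hne []]
  have hlen : 1 ≤ (eclRef false seg).length := List.length_pos_of_ne_nil hne
  have hget : PySem.List.pyGet? (eclRef false seg) (-1) = some ((eclRef false seg).getLast hne) := by
    simp only [PySem.List.pyGet?, PySem.List.pyIdx?]
    rw [if_pos (by omega : -((eclRef false seg).length : Int) ≤ -1)]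
    show (eclRef false seg)[(eclRef false seg).length - (- (-1 : Int)).toNat]? = _
    rw [show (- (-1 : Int)).toNat = 1 from rfl,
        List.getElem?_eq_getElem (by omega)]
    simp [List.getLast_eq_getElem]
  have hslice : PySem.List.slice (eclRef false seg) none (some (-1))
      = (eclRef false seg).dropLast := by
    simp only [PySem.List.slice, PySem.List.clampIdx]
    rw [if_pos (by norm_num : (-1 : Int) < 0),
        if_neg (by omega : ¬ ((eclRef false seg).length : Int) + -1 < 0),
        List.dropLast_eq_take]
    congr 1
    omega
  show (let raw := eclRef false seg
        let parts := (PySem.List.slice raw none (some (-1))).map PySem.Chars.strip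
        match PySem.List.pyGet? raw (-1) with
        | none => parts
        | some last => if last ≠ [] then parts ++ [PySem.Chars.strip last] else parts) = _
  simp only [hget, hslice]
  by_cases hlast : (eclRef false seg).getLast hne = [] <;> simp [hlast]

-- strip only removes characters
theorem mem_strip {c : Char} {l : List Char} (h : c ∈ PySem.Chars.strip l) : c ∈ l := by
  simp only [PySem.Chars.strip, PySem.Chars.rstrip, PySem.Chars.lstrip] at h
  have h1 := (List.dropWhile_sublist (l := (List.dropWhile PySem.Chars.isspace l).reverse)
      (p := PySem.Chars.isspace)).mem (by simpa using h)
  exact (List.dropWhile_sublist (p := PySem.Chars.isspace)).mem (by simpa using h1)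

theorem mem_mySplit {q : Char} {l : List Char} :
    ∀ {pre p c}, p ∈ mySplit q pre l → c ∈ p → c ∈ pre ∨ c ∈ l := by
  induction l with
  | nil =>
      intro pre p c hp hc
      simp [mySplit] at hp
      subst hp; exact Or.inl hc
  | cons d r ih =>
      intro pre p c hp hc
      by_cases h : d = q
      · rw [mySplit, if_pos h] at hp
        rcases List.mem_cons.mp hp with rfl | hp'
        · exact Or.inl hc
        · rcases ih hp' hc with h1 | h1
          · simp at h1
          · exact Or.inr (List.mem_cons_of_mem _ h1)
      · rw [mySplit, if_neg h] at hp
        rcases ih hp hc with h1 | h1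
        · rcases List.mem_append.mp h1 with h2 | h2
          · exact Or.inl h2
          · simp at h2; subst h2; exact Or.inr (List.mem_cons_self ..)
        · exact Or.inr (List.mem_cons_of_mem _ h1)

-- A's outer loop body in canonical append-if form
theorem A_body_eq :
    (fun (acc : List (List (List Char))) seg0 =>
      let seg := PySem.Chars.strip seg0
      if PySem.Chars.isIn [','] seg then
        let parts := eclA_parts seg
        if parts ≠ [] then acc ++ [parts] else acc
      else acc)
    = fun acc seg0 =>
        if PySem.Chars.isIn [','] (PySem.Chars.strip seg0)
            && decide (eclA_parts (PySem.Chars.strip seg0) ≠ []) then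
          acc ++ [eclA_parts (PySem.Chars.strip seg0)]
        else acc := by
  funext acc seg0
  by_cases h1 : PySem.Chars.isIn [','] (PySem.Chars.strip seg0) = true <;>
    by_cases h2 : eclA_parts (PySem.Chars.strip seg0) = [] <;>
      simp [h1, h2]

-- ===== VERDICT (by name: the statement is the Claim_ definition above) =====
theorem mapFilter_congr {A B : Type} (xs : List A) (P1 P2 : A → Bool) (F1 F2 : A → B)
    (hp : ∀ x ∈ xs, P1 x = P2 x) (hf : ∀ x ∈ xs, F1 x = F2 x) :
    (xs.filter P1).map F1 = (xs.filter P2).map F2 := by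
  rw [← List.filter_congr hp]
  apply List.map_congr_left
  intro x hx
  exact hf x (List.mem_filter.mp hx).1

theorem extract_comma_lists_py_spec : Claim_equal_extract_comma_lists_py := by
  intro text hdom
  unfold Spec_extract_comma_lists_py extract_comma_lists_py extract_comma_lists_py_alt
  rw [A_body_eq, PySem.List.foldl_append_if]
  -- every segment of text is free of the marker character
  have hx : ∀ seg0 ∈ PySem.Chars.splitOn text.toList [';'],
      '\x00' ∉ PySem.Chars.strip seg0 := by
    intro seg0 hseg hmem
    rw [splitOn_eq_mySplit] at hseg
    have := mem_mySplit (pre := []) hseg (mem_strip hmem)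
    rcases this with h | h
    · simp at h
    · have := (List.all_eq_true.mp hdom) _ h
      simp [pvDomChar] at this
  simp only [List.filter_map, List.map_map, List.filter_filter, List.nil_append]
  apply mapFilter_congr
  · intro seg0 hseg
    simp [Function.comp, eclB_parts_eq _ (hx seg0 hseg), eclA_parts_eq, Bool.and_comm]
  · intro seg0 hseg
    simp [Function.comp, eclB_parts_eq _ (hx seg0 hseg), eclA_parts_eq]
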